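-- pv_equiv track=rewrite | github.com/cthoyt/geometric-graphs | src/geometric_graphs/generators.py | _hex_grid_helper
-- ===== SOURCE A (Python) =====
-- from itertools import combinations, count, repeat
--
-- def _hex_grid_helper(rows: int, columns: int) -> list[list[int]]:
--     rv = []
--     counter = count()
--
--     def _append_row(n: int) -> None:
--         rv.append([next(counter) for _ in range(n)])
--
--     # First row is special - always is the first quarter of a minor row
--     _append_row(columns)
--
--     for row in range(rows):
--         for _ in range(2):  # double up rows for cross beams
--             _append_row(columns + 1 + row % 2)
--
--     # Last row is special, is columns + 1 if # rows is even, else columns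
--     _append_row(columns + (1 + rows) % 2)
--
--     return rv
-- ===== SOURCE B (Python) =====
-- def _hex_grid_helper(rows: int, columns: int) -> list[list[int]]:
--     # Closed-form random access: each row i of the grid is computed directly from i,
--     # with its first id given by an arithmetic prefix-sum formula (no sequential counter).
--     m = max(rows, 0)
--     L0 = max(columns, 0)
--     L1 = max(columns + 1, 0)
--     L2 = max(columns + 2, 0)
--
--     def start(i: int) -> int:
--         if i == 0:
--             return 0
--         if i <= 2 * m:
--             r, pos = divmod(i - 1, 2)
--             return (L0 + 2 * (((r + 1) // 2) * L1 + (r // 2) * L2)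
--                     + pos * (L1 if r % 2 == 0 else L2))
--         return L0 + 2 * (((m + 1) // 2) * L1 + (m // 2) * L2)
--
--     def length(i: int) -> int:
--         if i == 0:
--             return columns
--         if i <= 2 * m:
--             return columns + 1 + ((i - 1) // 2) % 2
--         return columns + (1 + rows) % 2
--
--     return [list(range(start(i), start(i) + length(i))) for i in range(2 * m + 2)]
-- ===== Notes on version B (the rewrite author's own statement) =====
-- stated objective: alternative
-- what changed: B computes each grid row independently by closed-form index arithmetic: row i's first id is an explicit prefix-sum formula over clamped row lengths (divmod on i), so the stateful count() iterator and the sequential append loop disappear; rows could be produced in any order.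
import Mathlib
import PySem

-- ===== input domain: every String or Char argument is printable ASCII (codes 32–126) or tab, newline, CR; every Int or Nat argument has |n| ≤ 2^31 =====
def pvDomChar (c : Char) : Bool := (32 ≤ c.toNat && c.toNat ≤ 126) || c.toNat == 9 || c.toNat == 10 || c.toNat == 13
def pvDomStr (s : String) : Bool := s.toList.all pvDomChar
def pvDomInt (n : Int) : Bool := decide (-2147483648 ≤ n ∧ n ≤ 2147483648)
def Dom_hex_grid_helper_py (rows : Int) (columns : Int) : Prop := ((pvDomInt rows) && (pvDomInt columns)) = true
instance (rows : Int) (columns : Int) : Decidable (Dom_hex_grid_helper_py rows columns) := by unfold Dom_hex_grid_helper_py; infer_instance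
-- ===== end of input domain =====

-- B replaces A's sequential count() counter with closed-form random access: each grid row i is
-- computed independently, its first id given by an arithmetic prefix-sum formula over i
-- (alternative algorithm, same cost).

-- ===== PORT A =====
-- _append_row(n): rv.append([next(counter) for _ in range(n)]); counter advances by max(n,0)
def hexAppendRow (st : List (List Int) × Int) (n : Int) : List (List Int) × Int :=
  (st.1 ++ [(List.range n.toNat).map (fun k : Nat => st.2 + (k : Int))], st.2 + (n.toNat : Int))

def hex_grid_helper_py (rows : Int) (columns : Int) : List (List Int) :=
  let st0 := hexAppendRow ([], 0) columns
  let st1 := (PySem.List.pyRange 0 rows 1).foldl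
    (fun st row =>
      (PySem.List.pyRange 0 2 1).foldl
        (fun st _ => hexAppendRow st (columns + 1 + PySem.Int.mod row 2)) st) st0
  (hexAppendRow st1 (columns + PySem.Int.mod (1 + rows) 2)).1

-- ===== PORT B =====
-- Source B's nested 'start(i)': closed-form first id of row i (prefix sum of clamped row lengths)
def hexStart (rows : Int) (columns : Int) (i : Int) : Int :=
  let m := max rows 0
  let L0 := max columns 0
  let L1 := max (columns + 1) 0
  let L2 := max (columns + 2) 0
  if i = 0 then 0
  else if i ≤ 2 * m then
    let r := PySem.Int.floordiv (i - 1) 2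
    let pos := PySem.Int.mod (i - 1) 2
    L0 + 2 * ((PySem.Int.floordiv (r + 1) 2) * L1 + (PySem.Int.floordiv r 2) * L2)
      + pos * (if PySem.Int.mod r 2 = 0 then L1 else L2)
  else L0 + 2 * ((PySem.Int.floordiv (m + 1) 2) * L1 + (PySem.Int.floordiv m 2) * L2)

-- Source B's nested 'length(i)': the length of row i
def hexLen (rows : Int) (columns : Int) (i : Int) : Int :=
  let m := max rows 0
  if i = 0 then columns
  else if i ≤ 2 * m then columns + 1 + PySem.Int.mod (PySem.Int.floordiv (i - 1) 2) 2
  else columns + PySem.Int.mod (1 + rows) 2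

-- [list(range(start(i), start(i) + length(i))) for i in range(2 * m + 2)]
def hex_grid_helper_py_alt (rows : Int) (columns : Int) : List (List Int) :=
  (PySem.List.pyRange 0 (2 * max rows 0 + 2) 1).map
    (fun i => PySem.List.pyRange (hexStart rows columns i)
      (hexStart rows columns i + hexLen rows columns i) 1)

-- ===== PRECONDITION & SPEC =====
def Spec_hex_grid_helper_py (rows : Int) (columns : Int) (out : List (List Int)) : Prop := out = hex_grid_helper_py_alt rows columns
instance (rows : Int) (columns : Int) (out : List (List Int)) : Decidable (Spec_hex_grid_helper_py rows columns out) := by unfold Spec_hex_grid_helper_py; infer_instance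

-- ===== CLAIM (what is proved, stated in full; the proofs are below) =====
def Claim_equal_hex_grid_helper_py : Prop := ∀ (rows : Int) (columns : Int), Dom_hex_grid_helper_py rows columns → Spec_hex_grid_helper_py rows columns (hex_grid_helper_py rows columns)

-- ===== LEMMAS AND PROOFS =====

-- the row [c, c+1, …, c+n-1]
def rowOf (c n : Int) : List Int := (List.range n.toNat).map (fun k : Nat => c + (k : Int))

-- total ids consumed by rows of the given lengths (Python range(n) yields max(n,0) ids)
def clampSum : List Int → Int
  | [] => 0
  | n :: ns => (n.toNat : Int) + clampSum ns

-- rows produced by consecutive ids starting at c with the given lengths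
def rowsFrom (c : Int) : List Int → List (List Int)
  | [] => []
  | n :: ns => rowOf c n :: rowsFrom (c + (n.toNat : Int)) ns

-- lengths of A's middle rows (row r twice, length columns+1+r%2)
def midLens (columns : Int) (m : Nat) : List Int :=
  (List.range m).flatMap (fun r =>
    [columns + 1 + ((r % 2 : Nat) : Int), columns + 1 + ((r % 2 : Nat) : Int)])

-- closed-form counter value after the first row and r double middle rows
def Cf (columns : Int) (r : Nat) : Int :=
  max columns 0 + 2 * ((((r + 1) / 2 : Nat) : Int) * max (columns + 1) 0
    + (((r / 2 : Nat)) : Int) * max (columns + 2) 0)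

-- the m-independent row function for indices 0 .. 2m (head + middle rows)
def hmid (columns : Int) (k : Nat) : List Int :=
  if k = 0 then rowOf 0 columns
  else rowOf (Cf columns ((k - 1) / 2)
      + (((k - 1) % 2 : Nat) : Int) *
        (if ((k - 1) / 2) % 2 = 0 then max (columns + 1) 0 else max (columns + 2) 0))
    (columns + 1 + ((((k - 1) / 2) % 2 : Nat) : Int))

theorem fdiv2 (a : Nat) : PySem.Int.floordiv (a : Int) 2 = ((a / 2 : Nat) : Int) := by
  exact_mod_cast PySem.Int.floordiv_natCast a 2

theorem fmod2 (a : Nat) : PySem.Int.mod (a : Int) 2 = ((a % 2 : Nat) : Int) := by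
  exact_mod_cast PySem.Int.mod_natCast a 2

theorem pyRange_rowOf (c n : Int) : PySem.List.pyRange c (c + n) 1 = rowOf c n := by
  rw [PySem.List.pyRange_one, rowOf, add_sub_cancel_left]

theorem foldl_hexAppendRow (ns : List Int) (acc : List (List Int)) (c : Int) :
    List.foldl hexAppendRow (acc, c) ns = (acc ++ rowsFrom c ns, c + clampSum ns) := by
  induction ns generalizing acc c with
  | nil => simp [rowsFrom, clampSum]
  | cons n ns ih => simp [hexAppendRow, rowsFrom, clampSum, ih, rowOf]; ring

theorem rowsFrom_append (xs ys : List Int) (c : Int) :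
    rowsFrom c (xs ++ ys) = rowsFrom c xs ++ rowsFrom (c + clampSum xs) ys := by
  induction xs generalizing c with
  | nil => simp [rowsFrom, clampSum]
  | cons x xs ih => simp [rowsFrom, clampSum, ih]; ring_nf

-- clamped middle-row length, by parity
theorem clampLen (columns : Int) (r : Nat) :
    (((columns + 1 + ((r % 2 : Nat) : Int)).toNat : Int))
      = if r % 2 = 0 then max (columns + 1) 0 else max (columns + 2) 0 := by
  rcases Nat.mod_two_eq_zero_or_one r with h | h <;> simp [h] <;> omega

theorem Cf_succ (columns : Int) (m : Nat) :
    Cf columns (m + 1)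
      = Cf columns m + 2 * (if m % 2 = 0 then max (columns + 1) 0 else max (columns + 2) 0) := by
  rcases Nat.even_or_odd m with ⟨t, rfl⟩ | ⟨t, rfl⟩
  · have h1 : (t + t + 1 + 1) / 2 = t + 1 := by omega
    have h2 : (t + t + 1) / 2 = t := by omega
    have h3 : (t + t) / 2 = t := by omega
    have h4 : (t + t) % 2 = 0 := by omega
    simp [Cf, h1, h2, h3, h4]; ring
  · have h1 : (2 * t + 1 + 1 + 1) / 2 = t + 1 := by omega
    have h2 : (2 * t + 1 + 1) / 2 = t + 1 := by omega
    have h3 : (2 * t + 1) / 2 = t := by omega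
    have h4 : (2 * t + 1) % 2 = 1 := by omega
    simp [Cf, h1, h2, h3, h4]; ring

theorem clampSum_mid (columns : Int) (m : Nat) :
    clampSum (columns :: midLens columns m) = Cf columns m := by
  induction m with
  | zero => simp [clampSum, midLens, Cf]
  | succ m ih =>
    have : midLens columns (m + 1) = midLens columns m
        ++ [columns + 1 + ((m % 2 : Nat) : Int), columns + 1 + ((m % 2 : Nat) : Int)] := by
      simp [midLens, List.range_succ]
    rw [this, Cf_succ]
    have hsum : ∀ xs ys, clampSum (xs ++ ys) = clampSum xs + clampSum ys := by
      intro xs ys; induction xs with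
      | nil => simp [clampSum]
      | cons a as ihh => simp [clampSum, ihh]; ring
    have := hsum (columns :: midLens columns m)
      [columns + 1 + ((m % 2 : Nat) : Int), columns + 1 + ((m % 2 : Nat) : Int)]
    simp only [List.cons_append] at this ⊢
    rw [this, ih, clampSum, clampSum, clampSum, clampLen]
    ring

theorem prefix_rows (columns : Int) (m : Nat) :
    rowsFrom 0 (columns :: midLens columns m) = (List.range (2 * m + 1)).map (hmid columns) := by
  induction m with
  | zero => simp [midLens, rowsFrom, hmid, List.range_succ]
  | succ m ih =>
    have hm : midLens columns (m + 1) = midLens columns m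
        ++ [columns + 1 + ((m % 2 : Nat) : Int), columns + 1 + ((m % 2 : Nat) : Int)] := by
      simp [midLens, List.range_succ]
    have hr : 2 * (m + 1) + 1 = (2 * m + 1) + 1 + 1 := by ring
    have hc : ((columns + 1 + ((m % 2 : Nat) : Int)).toNat : Int)
        = if m % 2 = 0 then max (columns + 1) 0 else max (columns + 2) 0 :=
      clampLen columns m
    have e1 : hmid columns (2 * m + 1)
        = rowOf (Cf columns m) (columns + 1 + ((m % 2 : Nat) : Int)) := by
      have d1 : (2 * m + 1 - 1) / 2 = m := by omega
      have d2 : (2 * m + 1 - 1) % 2 = 0 := by omega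
      simp only [hmid, d1, d2]
      rw [if_neg (by omega)]
      simp only [Nat.cast_zero, zero_mul, add_zero]
    have e2 : hmid columns (2 * m + 1 + 1)
        = rowOf (Cf columns m + ((columns + 1 + ((m % 2 : Nat) : Int)).toNat : Int))
            (columns + 1 + ((m % 2 : Nat) : Int)) := by
      have d1 : (2 * m + 1 + 1 - 1) / 2 = m := by omega
      have d2 : (2 * m + 1 + 1 - 1) % 2 = 1 := by omega
      simp only [hmid, d1, d2]
      rw [if_neg (by omega), hc]
      simp only [Nat.cast_one, one_mul]
    rw [hm, hr, List.range_succ, List.range_succ,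
      ← List.cons_append, rowsFrom_append, ih, clampSum_mid]
    simp only [List.map_append, List.map_cons, List.map_nil, rowsFrom, e1, e2, zero_add,
      List.append_assoc, List.cons_append, List.nil_append]

-- A computes rowsFrom 0 over the explicit lengths list
theorem A_eq (rows columns : Int) :
    hex_grid_helper_py rows columns
      = rowsFrom 0 ((columns :: midLens columns rows.toNat)
          ++ [columns + PySem.Int.mod (1 + rows) 2]) := by
  have h2 : PySem.List.pyRange 0 2 1 = [0, 1] := by decide
  simp only [hex_grid_helper_py]
  rw [h2, PySem.List.pyRange_one]
  have h0 : ((rows - 0).toNat) = rows.toNat := by omega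
  rw [h0, List.foldl_map]
  rw [PySem.List.foldl_congr_mem (List.range rows.toNat) _
      (fun (st : List (List Int) × Int) (k : Nat) => List.foldl hexAppendRow st
        [columns + 1 + ((k % 2 : Nat) : Int), columns + 1 + ((k % 2 : Nat) : Int)])
      (hexAppendRow ([], 0) columns)
      (by intro acc k _; rw [zero_add, fmod2]; rfl),
    ← List.foldl_flatMap]
  have hstart : hexAppendRow ([], 0) columns = List.foldl hexAppendRow ([], 0) [columns] := rfl
  rw [hstart, ← List.foldl_append]
  have hlast : ∀ st : List (List Int) × Int,
      (hexAppendRow st (columns + PySem.Int.mod (1 + rows) 2)).1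
        = (List.foldl hexAppendRow st [columns + PySem.Int.mod (1 + rows) 2]).1 := fun _ => rfl
  rw [hlast, ← List.foldl_append, foldl_hexAppendRow]
  simp [midLens]

-- B computes the same rows by direct index formulas
theorem B_eq (rows columns : Int) :
    hex_grid_helper_py_alt rows columns
      = (List.range (2 * rows.toNat + 1)).map (hmid columns)
        ++ [rowOf (Cf columns rows.toNat) (columns + PySem.Int.mod (1 + rows) 2)] := by
  have hM : max rows 0 = ((rows.toNat : Nat) : Int) := by omega
  simp only [hex_grid_helper_py_alt]
  rw [hM, PySem.List.pyRange_one]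
  have hlen : ((2 * ((rows.toNat : Nat) : Int) + 2) - 0).toNat = 2 * rows.toNat + 1 + 1 := by
    omega
  rw [hlen, List.range_succ, List.map_append, List.map_append, List.map_map, List.map_map]
  congr 1
  · apply List.map_congr_left
    intro k hk
    rw [List.mem_range] at hk
    simp only [Function.comp_apply]
    rw [zero_add]
    by_cases hk0 : k = 0
    · subst hk0
      have hs : hexStart rows columns ((0 : Nat) : Int) = 0 := by simp [hexStart]
      have hl : hexLen rows columns ((0 : Nat) : Int) = columns := by simp [hexLen]
      rw [hs, hl, pyRange_rowOf]
      simp [hmid]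
    · have hkk : ((k : Nat) : Int) ≠ 0 := by exact_mod_cast hk0
      have hle : ((k : Nat) : Int) ≤ 2 * max rows 0 := by rw [hM]; omega
      have e1 : ((k : Nat) : Int) - 1 = (((k - 1 : Nat)) : Int) := by omega
      have hs : hexStart rows columns ((k : Nat) : Int)
          = Cf columns ((k - 1) / 2) + (((k - 1) % 2 : Nat) : Int) *
              (if ((k - 1) / 2) % 2 = 0 then max (columns + 1) 0 else max (columns + 2) 0) := by
        simp only [hexStart, if_neg hkk, if_pos hle, e1, fdiv2, fmod2]
        have hdvd : ((2 : Int) ∣ (((k - 1 : Nat)) : Int) / 2) ↔ (k - 1) / 2 % 2 = 0 := by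
          omega
        simp [Cf, hdvd]
      have hl : hexLen rows columns ((k : Nat) : Int)
          = columns + 1 + ((((k - 1) / 2) % 2 : Nat) : Int) := by
        simp only [hexLen, if_neg hkk, if_pos hle, e1, fdiv2, fmod2]
      rw [hs, hl, pyRange_rowOf, hmid, if_neg hk0]
  · simp only [List.map_cons, List.map_nil, Function.comp_apply]
    have hkk : (((2 * rows.toNat + 1 : Nat)) : Int) ≠ 0 := by push_cast; omega
    have hgt : ¬ (((2 * rows.toNat + 1 : Nat)) : Int) ≤ 2 * max rows 0 := by
      rw [hM]; push_cast; omega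
    have hm1 : ((rows.toNat : Nat) : Int) + 1 = (((rows.toNat + 1 : Nat)) : Int) := by omega
    have hgt' : ¬ (((2 * rows.toNat + 1 : Nat)) : Int) ≤ 2 * ((rows.toNat : Nat) : Int) := by
      push_cast; omega
    have hs : hexStart rows columns (((2 * rows.toNat + 1 : Nat)) : Int)
        = Cf columns rows.toNat := by
      simp only [hexStart, hM, if_neg hkk, if_neg hgt', hm1, fdiv2, Cf]
    have hl : hexLen rows columns (((2 * rows.toNat + 1 : Nat)) : Int)
        = columns + PySem.Int.mod (1 + rows) 2 := by
      simp only [hexLen, if_neg hkk, if_neg hgt]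
    rw [zero_add, hs, hl, pyRange_rowOf]

-- ===== VERDICT (by name: the statement is the Claim_ definition above) =====
theorem hex_grid_helper_py_spec : Claim_equal_hex_grid_helper_py := by
  intro rows columns _
  show hex_grid_helper_py rows columns = hex_grid_helper_py_alt rows columns
  rw [A_eq, B_eq, rowsFrom_append, clampSum_mid, prefix_rows]
  simp [rowsFrom]
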